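-- pv_equiv track=rewrite | github.com/jonathanyulan99/SDE-Fundamentals | ALL/Formation/Dictionary_Drills/number_of_unique_elements_variations.py | return_2_occurrences
-- ===== SOURCE A (Python) =====
-- def return_2_occurrences(nums: list[int]) -> int:
--     nums_occurrences = dict()
--     not_result = []
--
--     for num in nums:
--         if num in nums_occurrences:
--             nums_occurrences[num] += 1
--             if nums_occurrences.get(num) == 3:
--                 not_result.append(num)
--         else:
--             nums_occurrences[num] = 1
--
--     for num in nums:
--         if num not in not_result:
--             return num
-- ===== SOURCE B (Python) =====
-- def return_2_occurrences(nums: list[int]) -> int: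
--     if not nums:
--         return None
--     head = nums[0]
--     if nums.count(head) <= 2:
--         return head
--     return return_2_occurrences([y for y in nums[1:] if y != head])
-- ===== Notes on version B (the rewrite author's own statement) =====
-- stated objective: alternative
-- what changed: Replaces A's frequency-dictionary plus exclusion-list two-pass with a recursive peel-and-filter algorithm: look at the head, return it if its total count is at most 2, otherwise delete every occurrence of it and recurse on the filtered rest (no dictionary, no second scan).
import Mathlib
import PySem

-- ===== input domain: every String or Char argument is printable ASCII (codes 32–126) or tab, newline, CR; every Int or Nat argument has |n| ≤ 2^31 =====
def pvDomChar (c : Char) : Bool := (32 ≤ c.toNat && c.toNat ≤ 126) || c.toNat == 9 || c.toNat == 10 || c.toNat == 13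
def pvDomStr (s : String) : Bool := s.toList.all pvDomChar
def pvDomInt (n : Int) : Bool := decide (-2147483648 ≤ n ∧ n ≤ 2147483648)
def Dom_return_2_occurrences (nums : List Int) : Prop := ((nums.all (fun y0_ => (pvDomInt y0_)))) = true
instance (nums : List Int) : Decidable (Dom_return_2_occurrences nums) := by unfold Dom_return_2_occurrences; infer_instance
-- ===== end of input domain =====

-- B replaces A's frequency-dict + exclusion-list two-pass with a recursive peel-and-filter scan
-- (return the head if it occurs at most twice, else delete all its occurrences and recurse).

-- ===== PORT A =====
-- one iteration of A's first loop: state = (nums_occurrences, not_result)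
def pvStepA (st : PySem.Dict Int Int × List Int) (num : Int) : PySem.Dict Int Int × List Int :=
  if st.1.contains num then
    let d' := st.1.insert num (st.1.getD num 0 + 1)
    if d'.get? num == some 3 then (d', st.2 ++ [num]) else (d', st.2)
  else
    (st.1.insert num 1, st.2)

-- A's second loop: return the first num not in not_result
def pvFindA (nr : List Int) : List Int → Option Int
  | [] => none
  | x :: xs => if x ∈ nr then pvFindA nr xs else some x

def return_2_occurrences (nums : List Int) : Option Int :=
  pvFindA (nums.foldl pvStepA (PySem.Dict.empty, [])).2 nums

-- ===== PORT B =====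
-- recursive peel-and-filter: head with count ≤ 2 is the answer, otherwise drop every copy of it
def return_2_occurrences_alt : List Int → Option Int
  | [] => none
  | x :: xs =>
    if PySem.List.count (x :: xs) x ≤ 2 then some x
    else return_2_occurrences_alt (xs.filter (fun y => y ≠ x))
  termination_by l => l.length
  decreasing_by
    have h1 := List.length_filter_le (fun p : {y // y ∈ xs} => decide (¬p.1 = x)) xs.attach
    simp only [List.length_attach] at h1
    simpa using Nat.lt_succ_of_le h1

-- ===== PRECONDITION & SPEC =====
def Spec_return_2_occurrences (nums : List Int) (out : Option Int) : Prop := out = return_2_occurrences_alt nums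
instance (nums : List Int) (out : Option Int) : Decidable (Spec_return_2_occurrences nums out) := by unfold Spec_return_2_occurrences; infer_instance

-- ===== CLAIM (what is proved, stated in full; the proofs are below) =====
def Claim_equal_return_2_occurrences : Prop := ∀ (nums : List Int), Dom_return_2_occurrences nums → Spec_return_2_occurrences nums (return_2_occurrences nums)

-- ===== LEMMAS AND PROOFS =====

-- proof-only characterisation: first element of l whose count in nums is ≤ 2
def pvFindB (nums : List Int) : List Int → Option Int
  | [] => none
  | x :: xs => if PySem.List.count nums x ≤ 2 then some x else pvFindB nums xs

-- Invariant of A's first loop: the dict holds the counts of the processed prefix, and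
-- not_result holds exactly the values whose count in the processed prefix reached 3.
lemma pvLoopA_inv : ∀ (l p : List Int) (d : PySem.Dict Int Int) (nr : List Int),
    (∀ x : Int, d.get? x = if p.count x = 0 then none else some (p.count x : Int)) →
    (∀ x : Int, x ∈ nr ↔ 3 ≤ p.count x) →
    ∀ x : Int, x ∈ (l.foldl pvStepA (d, nr)).2 ↔ 3 ≤ (p ++ l).count x := by
  intro l
  induction l with
  | nil => intro p d nr _ hn x; simpa using hn x
  | cons num l ih =>
    intro p d nr hd hn x
    have hstep : (num :: l).foldl pvStepA (d, nr) = l.foldl pvStepA (pvStepA (d, nr) num) := rfl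
    rw [hstep]
    have hassoc : p ++ num :: l = (p ++ [num]) ++ l := by simp
    rw [hassoc]
    have hcount : ∀ y : Int, (p ++ [num]).count y = p.count y + if y = num then 1 else 0 := by
      intro y
      by_cases hy : y = num
      · simp [hy, List.count_append]
      · have hne : num ≠ y := fun h => hy h.symm
        simp [hy, List.count_append, hne]
    by_cases hc : p.count num = 0
    · -- num not yet seen: else-branch of A
      have hcontains : d.contains num = false := by
        rw [PySem.Dict.contains_eq_isSome_get?, hd num, hc]; simp
      have hs : pvStepA (d, nr) num = (d.insert num 1, nr) := by
        simp [pvStepA, hcontains]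
      rw [hs]
      refine ih (p ++ [num]) _ _ ?_ ?_ x
      · intro y
        rw [PySem.Dict.get?_insert, hd y, hcount y]
        by_cases hy : y = num <;> simp [hy, hc]
      · intro y
        rw [hn y, hcount y]
        by_cases hy : y = num <;> simp [hy, hc]
    · -- num already present: then-branch of A
      have hcontains : d.contains num = true := by
        rw [PySem.Dict.contains_eq_isSome_get?, hd num]
        simp [hc]
      have hgetD : d.getD num 0 = (p.count num : Int) := by
        rw [PySem.Dict.getD_eq_get?_getD, hd num]
        simp [hc]
      have hget' : (d.insert num (d.getD num 0 + 1)).get? num = some ((p.count num : Int) + 1) := by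
        rw [PySem.Dict.get?_insert_self, hgetD]
      have hd' : ∀ y : Int,
          (d.insert num (d.getD num 0 + 1)).get? y
            = if (p ++ [num]).count y = 0 then none else some (((p ++ [num]).count y : Nat) : Int) := by
        intro y
        rw [PySem.Dict.get?_insert, hcount y]
        by_cases hy : y = num
        · subst hy
          have : p.count y + 1 ≠ 0 := by omega
          simp [hgetD]
        · simp [hy, hd y]
      by_cases h3 : p.count num = 2
      · -- count hits 3: num is appended to not_result
        have hs : pvStepA (d, nr) num = (d.insert num (d.getD num 0 + 1), nr ++ [num]) := by
          simp [pvStepA, hcontains, hget', h3]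
        rw [hs]
        refine ih (p ++ [num]) _ _ hd' ?_ x
        intro y
        rw [List.mem_append, hn y, hcount y]
        by_cases hy : y = num
        · simp [hy, h3]
        · simp [hy]
      · -- count does not hit 3: not_result unchanged
        have hne : ((p.count num : Int) + 1) ≠ 3 := by
          intro h
          have : p.count num = 2 := by omega
          exact h3 this
        have hs : pvStepA (d, nr) num = (d.insert num (d.getD num 0 + 1), nr) := by
          simp [pvStepA, hcontains, hget', hne]
        rw [hs]
        refine ih (p ++ [num]) _ _ hd' ?_ x
        intro y
        rw [hn y, hcount y]
        by_cases hy : y = num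
        · simp [hy]; omega
        · simp [hy]

-- A's two scans agree with the count characterisation when nr characterises "count ≥ 3".
lemma pvFindAB : ∀ (l : List Int) (nr nums : List Int),
    (∀ x : Int, x ∈ nr ↔ 3 ≤ nums.count x) →
    pvFindA nr l = pvFindB nums l := by
  intro l
  induction l with
  | nil => intro nr nums _; rfl
  | cons x xs ih =>
    intro nr nums h
    by_cases hx : x ∈ nr
    · have h3 : ¬ PySem.List.count nums x ≤ 2 := by
        rw [PySem.List.count_eq]; have := (h x).mp hx; omega
      simp only [pvFindA, pvFindB, if_pos hx, if_neg h3]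
      exact ih nr nums h
    · have h3 : PySem.List.count nums x ≤ 2 := by
        rw [PySem.List.count_eq]
        by_contra hcon
        exact hx ((h x).mpr (by omega))
      simp only [pvFindA, pvFindB, if_neg hx, if_pos h3]

-- Dropping all copies of an over-occurring value x does not change the first-good scan.
lemma pvFindB_filter : ∀ (l : List Int) (nums nums' : List Int) (x : Int),
    3 ≤ nums.count x →
    (∀ y : Int, y ≠ x → nums'.count y = nums.count y) →
    pvFindB nums l = pvFindB nums' (l.filter (fun y => y ≠ x)) := by
  intro l
  induction l with
  | nil => intro nums nums' x _ _; rfl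
  | cons z zs ih =>
    intro nums nums' x h3 hc
    by_cases hz : z = x
    · subst hz
      have hbad : ¬ PySem.List.count nums z ≤ 2 := by
        rw [PySem.List.count_eq]; omega
      rw [List.filter_cons_of_neg (by simp)]
      simp only [pvFindB, if_neg hbad]
      exact ih nums nums' z h3 hc
    · have hcz : nums'.count z = nums.count z := hc z hz
      rw [List.filter_cons_of_pos (by simp [hz])]
      by_cases hgood : PySem.List.count nums z ≤ 2
      · have hgood' : PySem.List.count nums' z ≤ 2 := by
          rw [PySem.List.count_eq] at *
          omega
        simp only [pvFindB, if_pos hgood, if_pos hgood']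
      · have hbad' : ¬ PySem.List.count nums' z ≤ 2 := by
          rw [PySem.List.count_eq] at *
          omega
        simp only [pvFindB, if_neg hgood, if_neg hbad']
        exact ih nums nums' x h3 hc

-- B equals the count characterisation
lemma pvAltB_eq_findB : ∀ (nums : List Int), return_2_occurrences_alt nums = pvFindB nums nums := by
  intro nums
  induction hn : nums.length using Nat.strong_induction_on generalizing nums with
  | _ n ih =>
    match nums with
    | [] => rw [return_2_occurrences_alt.eq_def]; rfl
    | x :: xs =>
      rw [return_2_occurrences_alt.eq_def]
      by_cases hgood : PySem.List.count (x :: xs) x ≤ 2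
      · simp only [pvFindB, if_pos hgood]
      · have h3 : 3 ≤ (x :: xs).count x := by
          rw [PySem.List.count_eq] at hgood; omega
        have hlen : (xs.filter (fun y => y ≠ x)).length < n := by
          have := List.length_filter_le (fun y : Int => decide (y ≠ x)) xs
          subst hn
          simp only [List.length_cons]
          omega
        have hIH := ih _ hlen (xs.filter (fun y => y ≠ x)) rfl
        simp only [pvFindB, if_neg hgood]
        rw [hIH]
        have hcount' : ∀ y : Int, y ≠ x → (xs.filter (fun y => y ≠ x)).count y = (x :: xs).count y := by
          intro y hy
          have hxy : ¬ x = y := fun h => hy h.symm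
          rw [List.count_filter (by simp [hy])]
          simp [hxy]
        exact (pvFindB_filter xs (x :: xs) (xs.filter (fun y => y ≠ x)) x h3 hcount').symm

-- ===== VERDICT (by name: the statement is the Claim_ definition above) =====
theorem return_2_occurrences_spec : Claim_equal_return_2_occurrences := by
  intro nums _
  unfold Spec_return_2_occurrences return_2_occurrences
  rw [pvAltB_eq_findB]
  apply pvFindAB
  have h := pvLoopA_inv nums [] PySem.Dict.empty []
    (by intro x; simp [PySem.Dict.get?_empty]) (by intro x; simp)
  simpa using h
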